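-- pv_equiv track=rewrite | github.com/aleary927/ECE3710-Group3 | scripts/beatsWindows.py | create_window_map_binary_0001
-- ===== SOURCE A (Python) =====
-- def create_window_map_binary_0001(total_duration, window_length, sequences):
--     num_windows = total_duration // window_length
--     window_map = []
--
--     # For each window
--     for i in range(num_windows):
--         window_value = 0  # Start with no instruments played (b'0000000000000000')
--
--         # Check which instruments are played
--         for instrument_index, sequence in enumerate(sequences):
--             for timestamp in sequence:
--                 if i * window_length <= timestamp < (i + 1) * window_length:
--                     # Set the corresponding bit for the instrument
--                     window_value |= (1 << (instrument_index * 4))  # Set bit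
--
--         window_map.append(window_value)
--
--     return window_map
-- ===== SOURCE B (Python) =====
-- def create_window_map_binary_0001(total_duration, window_length, sequences):
--     # Single pass: bucket each timestamp into its window by floor division.
--     num_windows = total_duration // window_length
--     window_map = [0] * max(num_windows, 0)
--     if window_length > 0:
--         for instrument_index, sequence in enumerate(sequences):
--             for timestamp in sequence:
--                 w = timestamp // window_length
--                 if 0 <= w < num_windows:
--                     window_map[w] |= 1 << (instrument_index * 4)
--     return window_map
-- ===== Notes on version B (the rewrite author's own statement) =====
-- stated objective: alternative
-- what changed: Instead of scanning every timestamp once per window (a loop over windows with a full nested scan of all sequences inside), B makes a single pass over the timestamps, bucketing each into its window by floor division and OR-ing the instrument bit into a preallocated array.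
import Mathlib
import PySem

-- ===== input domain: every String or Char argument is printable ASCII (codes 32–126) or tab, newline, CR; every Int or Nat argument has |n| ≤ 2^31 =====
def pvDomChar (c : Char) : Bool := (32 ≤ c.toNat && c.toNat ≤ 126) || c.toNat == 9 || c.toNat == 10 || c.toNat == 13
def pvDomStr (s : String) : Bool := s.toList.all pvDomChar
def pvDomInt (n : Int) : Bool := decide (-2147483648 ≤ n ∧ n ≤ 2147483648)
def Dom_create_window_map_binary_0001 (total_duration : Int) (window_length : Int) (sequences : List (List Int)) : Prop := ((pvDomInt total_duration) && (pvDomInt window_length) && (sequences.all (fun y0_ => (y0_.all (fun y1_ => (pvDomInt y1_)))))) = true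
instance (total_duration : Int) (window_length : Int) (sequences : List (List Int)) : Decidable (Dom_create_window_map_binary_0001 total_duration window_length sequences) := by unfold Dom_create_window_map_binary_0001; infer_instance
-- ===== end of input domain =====

-- B replaces A's scan of every timestamp for every window by a single pass that buckets
-- each timestamp into its window via floor division.

-- Python's  1 << (instrument_index * 4)  (index nonnegative, so .toNat is exact)
def pvBit (idx : Int) : Int := 1 <<< (idx * 4).toNat

-- ===== PORT A =====
def create_window_map_binary_0001 (total_duration : Int) (window_length : Int) (sequences : List (List Int)) : List Int :=
  let num_windows := PySem.Int.floordiv total_duration window_length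
  (PySem.List.pyRange 0 num_windows 1).foldl (fun window_map i =>
    let window_value :=
      (PySem.List.enumerate sequences 0).foldl (fun window_value p =>
        p.2.foldl (fun window_value timestamp =>
          if i * window_length ≤ timestamp ∧ timestamp < (i + 1) * window_length then
            PySem.Int.bor window_value (pvBit p.1)
          else window_value) window_value) 0
    window_map ++ [window_value]) []

-- ===== PORT B =====
def create_window_map_binary_0001_alt (total_duration : Int) (window_length : Int) (sequences : List (List Int)) : List Int :=
  let num_windows := PySem.Int.floordiv total_duration window_length
  let window_map := List.replicate (max num_windows 0).toNat (0 : Int)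
  if 0 < window_length then
    (PySem.List.enumerate sequences 0).foldl (fun wm p =>
      p.2.foldl (fun wm timestamp =>
        let w := PySem.Int.floordiv timestamp window_length
        if 0 ≤ w ∧ w < num_windows then
          -- the guard makes 0 ≤ w < len(wm), so plain getD/set are exact for Python's wm[w]
          wm.set w.toNat (PySem.Int.bor (wm.getD w.toNat 0) (pvBit p.1))
        else wm) wm) window_map
  else window_map

-- ===== PRECONDITION & SPEC =====
-- Pre_ excludes only window_length = 0, where the Python A raises ZeroDivisionError (B raises there too).
def Pre_create_window_map_binary_0001 (total_duration : Int) (window_length : Int) (sequences : List (List Int)) : Prop :=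
  window_length ≠ 0
instance (total_duration : Int) (window_length : Int) (sequences : List (List Int)) : Decidable (Pre_create_window_map_binary_0001 total_duration window_length sequences) := by unfold Pre_create_window_map_binary_0001; infer_instance

def pvWitness_create_window_map_binary_0001 : Int × Int × List (List Int) := (10, 3, [[0, 5], [7]])

def Spec_create_window_map_binary_0001 (total_duration : Int) (window_length : Int) (sequences : List (List Int)) (out : List Int) : Prop := out = create_window_map_binary_0001_alt total_duration window_length sequences
instance (total_duration : Int) (window_length : Int) (sequences : List (List Int)) (out : List Int) : Decidable (Spec_create_window_map_binary_0001 total_duration window_length sequences out) := by unfold Spec_create_window_map_binary_0001; infer_instance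

-- ===== CLAIM (what is proved, stated in full; the proofs are below) =====
def Claim_equal_create_window_map_binary_0001 : Prop := ∀ (total_duration : Int) (window_length : Int) (sequences : List (List Int)), Dom_create_window_map_binary_0001 total_duration window_length sequences → Pre_create_window_map_binary_0001 total_duration window_length sequences → Spec_create_window_map_binary_0001 total_duration window_length sequences (create_window_map_binary_0001 total_duration window_length sequences)

-- ===== LEMMAS AND PROOFS =====

-- the flattened (instrument index, timestamp) event list both nested loops traverse
def pvPairs (sequences : List (List Int)) : List (Int × Int) :=
  (PySem.List.enumerate sequences 0).flatMap (fun p => p.2.map (fun t => (p.1, t)))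

-- a fold that appends one mapped element per step builds init ++ map
theorem pv_foldl_append_map {α : Type} (f : α → Int) :
    ∀ (l : List α) (init : List Int),
      l.foldl (fun acc x => acc ++ [f x]) init = init ++ l.map f := by
  intro l
  induction l with
  | nil => intro init; simp
  | cons x xs ih => intro init; simp [List.foldl_cons, ih]

-- a nested fold over (index, sequence) pairs is the flat fold over the flattened pair list
theorem pv_nested_eq_flat {σ : Type} (g : Int → σ → Int → σ) :
    ∀ (E : List (Int × List Int)) (init : σ),
      E.foldl (fun s p => p.2.foldl (g p.1) s) init
        = (E.flatMap (fun p => p.2.map (fun t => (p.1, t)))).foldl (fun s q => g q.1 s q.2) init := by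
  intro E
  induction E with
  | nil => intro init; simp
  | cons p E ih => intro init; simp [List.foldl_cons, List.foldl_append, List.foldl_map, ih]

theorem pv_getD_set (l : List Int) (k j : Nat) (x : Int) :
    (l.set k x).getD j 0 = if k = j ∧ j < l.length then x else l.getD j 0 := by
  simp only [List.getD_eq_getElem?_getD, List.getElem?_set]
  split_ifs with h1 h2 h3 h3 <;> simp_all

-- the bucket-update fold, flattened: length is preserved and slot j accumulates exactly
-- the events whose timestamp floor-divides to j
theorem pv_bucket_fold (wl nw : Int) :
    ∀ (L : List (Int × Int)) (wm : List Int),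
      (∀ w : Int, 0 ≤ w → w < nw → w.toNat < wm.length) →
      (L.foldl (fun wm q =>
          let w := PySem.Int.floordiv q.2 wl
          if 0 ≤ w ∧ w < nw then
            wm.set w.toNat (PySem.Int.bor (wm.getD w.toNat 0) (pvBit q.1))
          else wm) wm).length = wm.length ∧
      ∀ j : Nat, j < wm.length →
        (L.foldl (fun wm q =>
            let w := PySem.Int.floordiv q.2 wl
            if 0 ≤ w ∧ w < nw then
              wm.set w.toNat (PySem.Int.bor (wm.getD w.toNat 0) (pvBit q.1))
            else wm) wm).getD j 0
          = L.foldl (fun v q =>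
              if PySem.Int.floordiv q.2 wl = (j : Int) ∧ (j : Int) < nw then
                PySem.Int.bor v (pvBit q.1)
              else v) (wm.getD j 0) := by
  intro L
  induction L with
  | nil => intro wm _; exact ⟨rfl, fun _ _ => rfl⟩
  | cons q L ih =>
    intro wm h
    simp only [List.foldl_cons]
    by_cases hc : 0 ≤ PySem.Int.floordiv q.2 wl ∧ PySem.Int.floordiv q.2 wl < nw
    · set w := PySem.Int.floordiv q.2 wl with hw
      simp only [if_pos hc]
      set wm' := wm.set w.toNat (PySem.Int.bor (wm.getD w.toNat 0) (pvBit q.1)) with hwm'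
      have hlen' : wm'.length = wm.length := List.length_set
      obtain ⟨ihlen, ihget⟩ := ih wm' (by rw [hlen']; exact h)
      refine ⟨by rw [ihlen, hlen'], ?_⟩
      intro j hj
      rw [ihget j (by rw [hlen']; exact hj)]
      have hstart : wm'.getD j 0
          = if w = (j : Int) ∧ (j : Int) < nw then
              PySem.Int.bor (wm.getD j 0) (pvBit q.1)
            else wm.getD j 0 := by
        rw [hwm', pv_getD_set]
        have : (w.toNat = j ∧ j < wm.length) ↔ (w = (j : Int) ∧ (j : Int) < nw) := by
          constructor
          · rintro ⟨h1, _⟩; constructor <;> omega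
          · rintro ⟨h1, _⟩; exact ⟨by omega, hj⟩
        by_cases hcase : w = (j : Int) ∧ (j : Int) < nw
        · rw [if_pos (this.mpr hcase), if_pos hcase]
          have : w.toNat = j := by omega
          rw [this]
        · rw [if_neg (fun hh => hcase (this.mp hh)), if_neg hcase]
      rw [hstart]
    · simp only [if_neg hc]
      obtain ⟨ihlen, ihget⟩ := ih wm h
      refine ⟨ihlen, ?_⟩
      intro j hj
      rw [ihget j hj]
      have hcond : ¬ (PySem.Int.floordiv q.2 wl = (j : Int) ∧ (j : Int) < nw) := by
        rintro ⟨h1, h2⟩; exact hc ⟨by omega, by omega⟩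
      rw [if_neg hcond]

-- A's result, written as a map over the window indices of a flat fold over the events
theorem pv_A_eq (total_duration window_length : Int) (sequences : List (List Int)) :
    create_window_map_binary_0001 total_duration window_length sequences
      = (PySem.List.pyRange 0 (PySem.Int.floordiv total_duration window_length) 1).map
          (fun i => (pvPairs sequences).foldl (fun v q =>
            if i * window_length ≤ q.2 ∧ q.2 < (i + 1) * window_length then
              PySem.Int.bor v (pvBit q.1)
            else v) 0) := by
  unfold create_window_map_binary_0001 pvPairs
  rw [pv_foldl_append_map]
  rw [List.nil_append]
  apply List.map_congr_left
  intro i _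
  exact pv_nested_eq_flat
    (fun idx v t =>
      if i * window_length ≤ t ∧ t < (i + 1) * window_length then
        PySem.Int.bor v (pvBit idx)
      else v)
    (PySem.List.enumerate sequences 0) 0

-- B's result for a positive window length, as the flat bucket fold over the events
theorem pv_B_eq (total_duration window_length : Int) (sequences : List (List Int))
    (hwl : 0 < window_length) :
    create_window_map_binary_0001_alt total_duration window_length sequences
      = (pvPairs sequences).foldl (fun wm q =>
          let w := PySem.Int.floordiv q.2 window_length
          if 0 ≤ w ∧ w < PySem.Int.floordiv total_duration window_length then
            wm.set w.toNat (PySem.Int.bor (wm.getD w.toNat 0) (pvBit q.1))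
          else wm)
          (List.replicate (max (PySem.Int.floordiv total_duration window_length) 0).toNat 0) := by
  unfold create_window_map_binary_0001_alt pvPairs
  rw [if_pos hwl]
  exact pv_nested_eq_flat
    (fun idx (wm : List Int) (t : Int) =>
      let w := PySem.Int.floordiv t window_length
      if 0 ≤ w ∧ w < PySem.Int.floordiv total_duration window_length then
        wm.set w.toNat (PySem.Int.bor (wm.getD w.toNat 0) (pvBit idx))
      else wm)
    (PySem.List.enumerate sequences 0) _

-- a guarded fold whose guard never fires keeps its accumulator
theorem pv_foldl_id {σ : Type} (P : Int × Int → Prop) [DecidablePred P]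
    (f : σ → Int × Int → σ) :
    ∀ (L : List (Int × Int)) (v : σ), (∀ q, ¬ P q) →
      L.foldl (fun v q => if P q then f v q else v) v = v := by
  intro L
  induction L with
  | nil => intro v _; rfl
  | cons q L ih => intro v hP; simp only [List.foldl_cons, if_neg (hP q)]; exact ih v hP

-- ===== VERDICT (by name: the statement is the Claim_ definition above) =====
theorem create_window_map_binary_0001_spec : Claim_equal_create_window_map_binary_0001 := by
  intro total_duration window_length sequences _ hpre
  unfold Spec_create_window_map_binary_0001
  unfold Pre_create_window_map_binary_0001 at hpre
  rcases lt_or_gt_of_ne hpre with hneg | hpos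
  · -- window_length < 0: every window condition is vacuous, both sides are all-zero rows
    rw [pv_A_eq]
    have hzero : ∀ i ∈ PySem.List.pyRange 0 (PySem.Int.floordiv total_duration window_length) 1,
        (pvPairs sequences).foldl (fun v q =>
          if i * window_length ≤ q.2 ∧ q.2 < (i + 1) * window_length then
            PySem.Int.bor v (pvBit q.1)
          else v) 0 = (0 : Int) := by
      intro i _
      apply pv_foldl_id
      rintro q ⟨h1, h2⟩
      have he : (i + 1) * window_length = i * window_length + window_length := by ring
      rw [he] at h2
      have : i * window_length ≤ q.2 := h1
      linarith
    rw [List.map_congr_left hzero, List.map_const']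
    unfold create_window_map_binary_0001_alt
    rw [if_neg (by omega)]
    congr 1
    rw [PySem.List.length_pyRange_one]
    omega
  · -- window_length > 0: bucket fold fills exactly A's windows
    rw [pv_A_eq, pv_B_eq _ _ _ hpos]
    set nw := PySem.Int.floordiv total_duration window_length with hnw
    have hrep : (List.replicate (max nw 0).toNat (0 : Int)).length = (max nw 0).toNat :=
      List.length_replicate
    have hbound : ∀ w : Int, 0 ≤ w → w < nw →
        w.toNat < (List.replicate (max nw 0).toNat (0 : Int)).length := by
      intro w h1 h2; rw [hrep]; omega
    obtain ⟨hlen, hget⟩ := pv_bucket_fold window_length nw (pvPairs sequences)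
      (List.replicate (max nw 0).toNat 0) hbound
    apply List.ext_getElem
    · rw [List.length_map, PySem.List.length_pyRange_one, hlen, hrep]; omega
    · intro j hj1 hj2
      have hjlen : j < (List.replicate (max nw 0).toNat (0 : Int)).length := by
        rw [hrep]
        rw [List.length_map, PySem.List.length_pyRange_one] at hj1
        omega
      have hjnw : (j : Int) < nw := by
        rw [hrep] at hjlen; omega
      rw [List.getElem_map, PySem.List.getElem_pyRange_one]
      rw [← List.getD_eq_getElem _ 0 hj2, hget j hjlen]
      have hstart : (List.replicate (max nw 0).toNat (0 : Int)).getD j 0 = 0 := by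
        simp [List.getD_eq_getElem?_getD]
      rw [hstart]
      congr 1
      funext v q
      have hiff : (PySem.Int.floordiv q.2 window_length = (j : Int) ∧ (j : Int) < nw)
          ↔ ((0 + (j : Int)) * window_length ≤ q.2 ∧ q.2 < ((0 + (j : Int)) + 1) * window_length) := by
        rw [PySem.Int.floordiv_eq_iff_of_pos hpos, zero_add]
        constructor
        · rintro ⟨⟨a, b⟩, _⟩; exact ⟨a, b⟩
        · rintro ⟨a, b⟩; exact ⟨⟨a, b⟩, hjnw⟩
      by_cases hcase : PySem.Int.floordiv q.2 window_length = (j : Int) ∧ (j : Int) < nw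
      · rw [if_pos hcase, if_pos (hiff.mp hcase)]
      · rw [if_neg hcase, if_neg (fun hh => hcase (hiff.mpr hh))]
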